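-- pv_equiv track=rewrite | github.com/edotarci/Project_on_Betti_Numbers | chain_counter_yes_weights.py | eliminate_super_banned
-- ===== SOURCE A (Python) =====
-- def eliminate_super_banned(semifinal_list, banned_couples_list, step):
--     final_list = []
--
--     for elem in semifinal_list:
--         skip_elem = False
--         for coppia in banned_couples_list:
--             if coppia[0] in elem and coppia[0]+1 in elem and coppia[1] in elem:
--                 skip_elem = True
--                 break
--
--         if not skip_elem:
--             final_list.append(elem)
--
--     return final_list
-- ===== SOURCE B (Python) =====
-- def eliminate_super_banned(semifinal_list, banned_couples_list, step):
--     removed = set()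
--     for coppia in banned_couples_list:
--         for i, elem in enumerate(semifinal_list):
--             if coppia[0] in elem and coppia[0]+1 in elem and coppia[1] in elem:
--                 removed.add(i)
--     return [elem for i, elem in enumerate(semifinal_list) if i not in removed]
-- ===== Notes on version B (the rewrite author's own statement) =====
-- stated objective: alternative
-- what changed: Inverted control flow: B loops over banned couples first, recording the indices of offending elements in a set, then filters the list by index in one final pass, instead of A's per-element inner scan with a skip flag and early break.
import Mathlib
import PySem

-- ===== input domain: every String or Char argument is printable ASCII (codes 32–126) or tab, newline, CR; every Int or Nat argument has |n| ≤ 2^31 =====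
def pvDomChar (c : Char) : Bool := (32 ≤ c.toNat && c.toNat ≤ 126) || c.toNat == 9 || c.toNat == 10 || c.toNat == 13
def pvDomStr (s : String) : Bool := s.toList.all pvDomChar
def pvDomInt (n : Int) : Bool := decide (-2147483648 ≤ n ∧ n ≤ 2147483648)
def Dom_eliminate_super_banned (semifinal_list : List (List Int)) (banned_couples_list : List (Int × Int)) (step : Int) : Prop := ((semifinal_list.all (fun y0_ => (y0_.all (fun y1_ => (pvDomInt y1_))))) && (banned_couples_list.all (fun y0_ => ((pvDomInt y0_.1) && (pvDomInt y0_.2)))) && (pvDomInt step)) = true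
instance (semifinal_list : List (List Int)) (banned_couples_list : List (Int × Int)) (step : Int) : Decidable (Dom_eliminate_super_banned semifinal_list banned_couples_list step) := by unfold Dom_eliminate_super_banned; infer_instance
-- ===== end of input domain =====

-- B inverts the control flow: it loops over the banned couples first, collecting the indices of
-- offending elements into a set, then filters the list by index in one final pass (alternative
-- decomposition, same asymptotic cost).

-- ===== PORT A =====
-- inner 'for coppia in banned_couples_list: … break' loop of A
def esbInnerA (elem : List Int) : List (Int × Int) → Bool
  | [] => false
  | coppia :: rest =>
      if elem.contains coppia.1 && elem.contains (coppia.1 + 1) && elem.contains coppia.2 then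
        true
      else esbInnerA elem rest

def eliminate_super_banned (semifinal_list : List (List Int)) (banned_couples_list : List (Int × Int)) (step : Int) : List (List Int) :=
  semifinal_list.foldl
    (fun final_list elem =>
      if esbInnerA elem banned_couples_list then final_list else final_list ++ [elem])
    []

-- ===== PORT B =====
def eliminate_super_banned_alt (semifinal_list : List (List Int)) (banned_couples_list : List (Int × Int)) (step : Int) : List (List Int) :=
  let removed : PySem.Set Int :=
    banned_couples_list.foldl
      (fun removed coppia =>
        (PySem.List.enumerate semifinal_list 0).foldl
          (fun removed ie =>
            if ie.2.contains coppia.1 && ie.2.contains (coppia.1 + 1) && ie.2.contains coppia.2 then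
              PySem.Set.add removed ie.1
            else removed)
          removed)
      PySem.Set.empty
  (PySem.List.enumerate semifinal_list 0).foldl
    (fun acc ie => if PySem.Set.contains removed ie.1 then acc else acc ++ [ie.2]) []

-- ===== PRECONDITION & SPEC =====
def Spec_eliminate_super_banned (semifinal_list : List (List Int)) (banned_couples_list : List (Int × Int)) (step : Int) (out : List (List Int)) : Prop := out = eliminate_super_banned_alt semifinal_list banned_couples_list step
instance (semifinal_list : List (List Int)) (banned_couples_list : List (Int × Int)) (step : Int) (out : List (List Int)) : Decidable (Spec_eliminate_super_banned semifinal_list banned_couples_list step out) := by unfold Spec_eliminate_super_banned; infer_instance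

-- ===== CLAIM (what is proved, stated in full; the proofs are below) =====
def Claim_equal_eliminate_super_banned : Prop := ∀ (semifinal_list : List (List Int)) (banned_couples_list : List (Int × Int)) (step : Int), Dom_eliminate_super_banned semifinal_list banned_couples_list step → Spec_eliminate_super_banned semifinal_list banned_couples_list step (eliminate_super_banned semifinal_list banned_couples_list step)

-- ===== LEMMAS AND PROOFS =====

-- the per-element "banned" predicate both programs decide
def esbBad (banned_couples_list : List (Int × Int)) (elem : List Int) : Bool :=
  banned_couples_list.any
    (fun coppia => elem.contains coppia.1 && elem.contains (coppia.1 + 1) && elem.contains coppia.2)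

theorem esbInnerA_eq_any (elem : List Int) (bl : List (Int × Int)) :
    esbInnerA elem bl = esbBad bl elem := by
  induction bl with
  | nil => rfl
  | cons c rest ih => simp [esbInnerA, esbBad, List.any_cons, ih]

-- generic: membership in a fold that conditionally adds f b to a PySem.Set
theorem mem_foldl_add_if {α β : Type} [BEq α] [LawfulBEq α]
    (l : List β) (p : β → Bool) (f : β → α) (s : PySem.Set α) (x : α) :
    (x ∈ l.foldl (fun s b => if p b then PySem.Set.add s (f b) else s) s)
      ↔ x ∈ s ∨ ∃ b ∈ l, p b ∧ x = f b := by
  induction l generalizing s with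
  | nil => simp
  | cons b rest ih =>
      simp only [List.foldl_cons]
      rw [ih]
      by_cases hb : p b
      · simp [hb, PySem.Set.mem_add]
        try tauto
      · simp [hb]
        try tauto

-- characterisation of the removed-index set built by B
theorem mem_removed (sl : List (List Int)) (bl : List (Int × Int)) (s : PySem.Set Int) (x : Int) :
    (x ∈ bl.foldl
        (fun removed coppia =>
          (PySem.List.enumerate sl 0).foldl
            (fun removed ie =>
              if ie.2.contains coppia.1 && ie.2.contains (coppia.1 + 1) && ie.2.contains coppia.2 then
                PySem.Set.add removed ie.1
              else removed)
            removed)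
        s)
      ↔ x ∈ s ∨ ∃ ie ∈ PySem.List.enumerate sl 0, esbBad bl ie.2 ∧ x = ie.1 := by
  induction bl generalizing s with
  | nil => simp [esbBad]
  | cons c rest ih =>
      simp only [List.foldl_cons]
      rw [ih, mem_foldl_add_if]
      constructor
      · rintro ((hs | ⟨ie, hie, hp, hx⟩) | ⟨ie, hie, hp, hx⟩)
        · exact Or.inl hs
        · refine Or.inr ⟨ie, hie, ?_, hx⟩
          simp only [esbBad, List.any_cons, Bool.or_eq_true]
          exact Or.inl hp
        · refine Or.inr ⟨ie, hie, ?_, hx⟩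
          simp only [esbBad, List.any_cons, Bool.or_eq_true]
          exact Or.inr hp
      · rintro (hs | ⟨ie, hie, hp, hx⟩)
        · exact Or.inl (Or.inl hs)
        · simp only [esbBad, List.any_cons, Bool.or_eq_true] at hp
          rcases hp with hp | hp
          · exact Or.inl (Or.inr ⟨ie, hie, hp, hx⟩)
          · exact Or.inr ⟨ie, hie, hp, hx⟩

-- shared final shape: conditional-append fold equals a filter
theorem foldl_skip_append (l : List (List Int)) (q : List Int → Bool) (acc : List (List Int)) :
    l.foldl (fun acc e => if q e then acc else acc ++ [e]) acc
      = acc ++ l.filter (fun e => !q e) := by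
  induction l generalizing acc with
  | nil => simp
  | cons e rest ih =>
      simp only [List.foldl_cons, List.filter_cons]
      by_cases h : q e <;> simp [h, ih]

theorem esb_A_filter (sl : List (List Int)) (bl : List (Int × Int)) (step : Int) :
    eliminate_super_banned sl bl step = sl.filter (fun e => !esbBad bl e) := by
  unfold eliminate_super_banned
  rw [PySem.List.foldl_congr_mem sl _
        (fun acc e => if esbBad bl e then acc else acc ++ [e]) []
        (fun acc e _ => by rw [esbInnerA_eq_any]),
      foldl_skip_append]
  simp

theorem esb_B_filter (sl : List (List Int)) (bl : List (Int × Int)) (step : Int) :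
    eliminate_super_banned_alt sl bl step = sl.filter (fun e => !esbBad bl e) := by
  have hcongr : ∀ (acc : List (List Int)), ∀ ie ∈ PySem.List.enumerate sl 0,
      (if PySem.Set.contains
            (bl.foldl
              (fun removed coppia =>
                (PySem.List.enumerate sl 0).foldl
                  (fun removed ie =>
                    if ie.2.contains coppia.1 && ie.2.contains (coppia.1 + 1) && ie.2.contains coppia.2 then
                      PySem.Set.add removed ie.1
                    else removed)
                  removed)
              PySem.Set.empty) ie.1
          then acc else acc ++ [ie.2])
        = (if esbBad bl ie.2 then acc else acc ++ [ie.2]) := by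
    intro acc ie hie
    congr 1
    rw [PySem.Set.contains_iff, mem_removed]
    simp only [PySem.Set.empty, List.not_mem_nil, false_or, eq_iff_iff]
    constructor
    · rintro ⟨ie', hie', hbad, hx⟩
      rw [PySem.List.mem_enumerate_iff] at hie hie'
      obtain ⟨k, hk, rfl⟩ := hie
      obtain ⟨k', hk', rfl⟩ := hie'
      simp only [zero_add, Int.natCast_inj] at hx
      subst hx
      exact hbad
    · intro hbad; exact ⟨ie, hie, hbad, rfl⟩
  show (PySem.List.enumerate sl 0).foldl
      (fun acc ie =>
        if PySem.Set.contains
            (bl.foldl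
              (fun removed coppia =>
                (PySem.List.enumerate sl 0).foldl
                  (fun removed ie =>
                    if ie.2.contains coppia.1 && ie.2.contains (coppia.1 + 1) && ie.2.contains coppia.2 then
                      PySem.Set.add removed ie.1
                    else removed)
                  removed)
              PySem.Set.empty) ie.1
          then acc else acc ++ [ie.2]) []
    = sl.filter (fun e => !esbBad bl e)
  rw [PySem.List.foldl_congr_mem (PySem.List.enumerate sl 0) _
        (fun acc (ie : Int × List Int) => if esbBad bl ie.2 then acc else acc ++ [ie.2]) [] hcongr,
      show (PySem.List.enumerate sl 0).foldl
        (fun acc (ie : Int × List Int) => if esbBad bl ie.2 then acc else acc ++ [ie.2]) []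
        = ((PySem.List.enumerate sl 0).map (·.2)).foldl
            (fun acc e => if esbBad bl e then acc else acc ++ [e]) [] from (List.foldl_map (f := fun x : Int × List Int => x.2)
            (g := fun acc e => if esbBad bl e then acc else acc ++ [e])
            (l := PySem.List.enumerate sl 0) (init := [])).symm,
      PySem.List.map_snd_enumerate, foldl_skip_append]
  simp

theorem eliminate_super_banned_spec : Claim_equal_eliminate_super_banned := by
  intro sl bl step _
  show eliminate_super_banned sl bl step = eliminate_super_banned_alt sl bl step
  rw [esb_A_filter sl bl step, esb_B_filter sl bl step]
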